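-- pv_equiv track=rewrite | github.com/allan-tulane/sp25-recitation-08-zevgaslin | sp25-recitation-08-zevgaslin/main.py | shortest_shortest_path
-- ===== SOURCE A (Python) =====
-- from heapq import heappush, heappop
--
-- def shortest_shortest_path(graph, source):
--     """
--     Params:
--       graph.....a graph represented as a dict where each key is a vertex
--                 and the value is a set of (vertex, weight) tuples (as in the test case)
--       source....the source node
--
--     Returns:
--       a dict where each key is a vertex and the value is a tuple of
--       (shortest path weight, shortest path number of edges). See test case for example.
--     """
--
--     ### TODO
--     queue = []
--     heappush(queue, (0, 0, source))
--     named = {}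
--     while queue:
--         distance_weight, distance_edges, node = heappop(queue)
--         if node in named:
--             continue
--         named[node] = (distance_weight, distance_edges)
--
--         for neighbor, weight in graph.get(node, []):
--             if neighbor not in named:
--                 heappush(
--                     queue,
--                     (distance_weight + weight, distance_edges + 1, neighbor))
--
--     return named
-- ===== SOURCE B (Python) =====
-- def shortest_shortest_path(graph, source):
--     """Dijkstra by repeated min-scan over the discovered frontier (no heap)."""
--     dist = {source: (0, 0)}
--     visited = {}
--     while dist:
--         u, (w, e) = min(dist.items(), key=lambda kv: (kv[1][0], kv[1][1], kv[0]))
--         del dist[u]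
--         visited[u] = (w, e)
--         for nb, wt in graph.get(u, []):
--             if nb not in visited:
--                 cand = (w + wt, e + 1)
--                 if nb not in dist or cand < dist[nb]:
--                     dist[nb] = cand
--     return visited
-- ===== Notes on version B (the rewrite author's own statement) =====
-- stated objective: simpler
-- what changed: Replaces the lazy-deletion binary heap (heapq with stale entries skipped on pop) by a plain frontier dict holding one best (weight, edges) candidate per discovered node, selecting each round's node by a min-scan keyed on (weight, edges, node) exactly like the heap's tuple order.
import Mathlib
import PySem

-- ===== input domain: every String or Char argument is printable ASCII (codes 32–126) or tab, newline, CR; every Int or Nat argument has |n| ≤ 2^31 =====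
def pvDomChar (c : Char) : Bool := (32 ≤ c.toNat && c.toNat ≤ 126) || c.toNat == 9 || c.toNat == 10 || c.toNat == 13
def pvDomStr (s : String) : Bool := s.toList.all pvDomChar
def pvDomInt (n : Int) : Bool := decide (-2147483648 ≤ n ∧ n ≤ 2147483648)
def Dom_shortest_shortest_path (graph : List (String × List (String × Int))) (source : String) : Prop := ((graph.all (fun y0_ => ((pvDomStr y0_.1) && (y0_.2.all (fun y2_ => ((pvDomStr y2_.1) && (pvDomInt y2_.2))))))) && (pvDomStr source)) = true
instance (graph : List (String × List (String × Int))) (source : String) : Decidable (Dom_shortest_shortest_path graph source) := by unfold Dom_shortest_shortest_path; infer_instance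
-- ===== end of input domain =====

-- B replaces A's heapq-based Dijkstra by a heap-free min-scan over the discovered frontier (same values, objective: simpler).


-- ===== PORT A =====
-- Python's heap entries (weight, edges, node) are compared lexicographically; pvKey maps an entry into the
-- lexicographic order, so `<`/`≤` on pvKey values are exactly Python's tuple comparison.
def pvKey (t : Int × Int × String) : Lex (Int × Lex (Int × String)) :=
  toLex (t.1, toLex (t.2.1, t.2.2))

-- first element of `a :: l` minimizing `f` (Python's min / the value heappop returns)
def pvMinBy {α : Type} (f : α → Lex (Int × Lex (Int × String))) (a : α) (l : List α) : α :=
  l.foldl (fun x y => if f y < f x then y else x) a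

-- graph.get(k, []) on the dict `graph`
def pvAdj (graph : List (String × List (String × Int))) (k : String) : List (String × Int) :=
  (PySem.Dict.mk graph).getD k []

-- all vertex names that can ever occur (source, keys, neighbors) — only used for termination measures
def pvU (graph : List (String × List (String × Int))) (source : String) : List String :=
  source :: graph.flatMap (fun pr => pr.1 :: pr.2.map Prod.fst)

lemma pvMinBy_mem {α : Type} (f : α → Lex (Int × Lex (Int × String))) (a : α) (l : List α) :
    pvMinBy f a l ∈ a :: l := by
  induction l generalizing a with
  | nil => simp [pvMinBy]
  | cons b t ih =>
    have h := ih (if f b < f a then b else a)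
    simp only [pvMinBy, List.foldl_cons] at h ⊢
    rcases List.mem_cons.1 h with h' | h'
    · rw [h']; split_ifs <;> simp
    · simp [List.mem_cons, h']

lemma pvAdj_fst_mem_pvU (graph : List (String × List (String × Int))) (source k : String)
    {p : String × Int} (hp : p ∈ pvAdj graph k) : p.1 ∈ pvU graph source := by
  unfold pvAdj PySem.Dict.getD PySem.Dict.get? at hp
  rcases hfind : List.find? (fun q => q.1 == k) (PySem.Dict.mk graph).items with _ | pr
  · rw [hfind] at hp; simp at hp
  · rw [hfind] at hp
    simp only [Option.map_some, Option.getD_some] at hp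
    have hmem : pr ∈ graph := List.mem_of_find?_eq_some hfind
    unfold pvU
    simp only [List.mem_cons, List.mem_flatMap]
    right
    exact ⟨pr, hmem, by simp [List.mem_map]; right; exact ⟨p.2, hp⟩⟩

-- termination measures
def pvVA (graph : List (String × List (String × Int))) (source : String)
    (q : List (Int × Int × String)) : Finset String :=
  (pvU graph source).toFinset ∪ (q.map (fun t => t.2.2)).toFinset

def pvMeasA (graph : List (String × List (String × Int))) (source : String)
    (q : List (Int × Int × String)) (named : PySem.Dict String (Int × Int)) : Nat :=
  ((pvVA graph source q) \ named.keys.toFinset).card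

lemma pvMeasA_mono (graph : List (String × List (String × Int))) (source : String)
    {q q' : List (Int × Int × String)} (named : PySem.Dict String (Int × Int))
    (h : pvVA graph source q' ⊆ pvVA graph source q) :
    pvMeasA graph source q' named ≤ pvMeasA graph source q named :=
  Finset.card_le_card (Finset.sdiff_subset_sdiff h (Finset.Subset.refl _))

lemma pvVA_erase_subset (graph : List (String × List (String × Int))) (source : String)
    (q : List (Int × Int × String)) (m : Int × Int × String) :
    pvVA graph source (q.erase m) ⊆ pvVA graph source q := by
  unfold pvVA
  apply Finset.union_subset_union (Finset.Subset.refl _)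
  intro x hx
  simp only [List.mem_toFinset] at hx ⊢
  exact ((List.erase_sublist (a := m) (l := q)).map (fun t => t.2.2)).subset hx

lemma pvMeasA_name_lt (graph : List (String × List (String × Int))) (source : String)
    {q q2 : List (Int × Int × String)} (named : PySem.Dict String (Int × Int))
    {m : Int × Int × String} (v : Int × Int) (hm : m ∈ q)
    (hnc : named.contains m.2.2 = false)
    (hsub : pvVA graph source q2 ⊆ pvVA graph source q) :
    pvMeasA graph source q2 (named.insert m.2.2 v) < pvMeasA graph source q named := by
  apply Finset.card_lt_card
  constructor
  · intro x hx
    simp only [Finset.mem_sdiff, List.mem_toFinset] at hx ⊢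
    refine ⟨hsub hx.1, fun hk => hx.2 ?_⟩
    rw [← PySem.Dict.contains_iff_mem_keys] at hk ⊢
    rw [PySem.Dict.contains_insert]
    simp [hk]
  · intro hall
    have h1 : m.2.2 ∈ pvVA graph source q \ named.keys.toFinset := by
      simp only [Finset.mem_sdiff, List.mem_toFinset]
      refine ⟨?_, fun hk => by
        rw [← PySem.Dict.contains_iff_mem_keys] at hk; simp [hk] at hnc⟩
      unfold pvVA
      simp only [Finset.mem_union, List.mem_toFinset, List.mem_map]
      exact Or.inr ⟨m, hm, rfl⟩
    have h2 := hall h1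
    simp only [Finset.mem_sdiff, List.mem_toFinset] at h2
    exact h2.2 (by rw [← PySem.Dict.contains_iff_mem_keys, PySem.Dict.contains_insert]; simp)

lemma pvVA_append (graph : List (String × List (String × Int))) (source : String)
    (q l : List (Int × Int × String)) :
    pvVA graph source (q ++ l) = pvVA graph source q ∪ (l.map (fun t => t.2.2)).toFinset := by
  unfold pvVA
  simp [List.toFinset_append, Finset.union_assoc]

-- Port of A. Python's heapq is modeled exactly by its observable behaviour: the queue is the multiset of
-- pushed entries, heappush appends, heappop removes a minimal entry under the tuple order (pvKey).
def pvLoopA (graph : List (String × List (String × Int))) (source : String)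
    (q : List (Int × Int × String)) (named : PySem.Dict String (Int × Int)) :
    PySem.Dict String (Int × Int) :=
  match q with
  | [] => named
  | m0 :: rest =>
    let m := pvMinBy pvKey m0 rest
    let q1 := (m0 :: rest).erase m
    if hcon : named.contains m.2.2 then
      pvLoopA graph source q1 named
    else
      let named' := named.insert m.2.2 (m.1, m.2.1)
      let q2 := (pvAdj graph m.2.2).foldl
        (fun acc p => if !(named'.contains p.1) then acc ++ [(m.1 + p.2, m.2.1 + 1, p.1)] else acc) q1
      pvLoopA graph source q2 named'
termination_by (pvMeasA graph source q named, q.length)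
decreasing_by
  · apply Prod.Lex.right'
    · exact pvMeasA_mono graph source named (pvVA_erase_subset graph source _ _)
    · have := List.length_erase_of_mem (pvMinBy_mem pvKey m0 rest)
      simp only [List.length_cons] at this ⊢
      omega
  · apply Prod.Lex.left
    simp only [dite_eq_ite]
    rw [PySem.List.foldl_append_if]
    apply pvMeasA_name_lt graph source named _ (pvMinBy_mem pvKey m0 rest)
    · simpa using hcon
    · rw [pvVA_append]
      apply Finset.union_subset
      · exact pvVA_erase_subset graph source _ _
      · intro x hx
        simp only [List.mem_toFinset, List.mem_map] at hx
        rcases hx with ⟨t, ht, rfl⟩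
        rcases ht with ⟨p, hp, rfl⟩
        unfold pvVA
        simp only [Finset.mem_union, List.mem_toFinset]
        exact Or.inl (pvAdj_fst_mem_pvU graph source _ (List.mem_of_mem_filter hp))

-- ===== PORT B =====
def pvMeasB (graph : List (String × List (String × Int))) (source : String)
    (visited : PySem.Dict String (Int × Int)) : Nat :=
  ((pvU graph source).toFinset \ visited.keys.toFinset).card

lemma pvMeasB_lt (graph : List (String × List (String × Int))) (source : String)
    (visited : PySem.Dict String (Int × Int)) (u : String) (v : Int × Int)
    (hu : u ∈ pvU graph source) (hnc : visited.contains u = false) :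
    pvMeasB graph source (visited.insert u v) < pvMeasB graph source visited := by
  apply Finset.card_lt_card
  constructor
  · intro x hx
    simp only [Finset.mem_sdiff, List.mem_toFinset] at hx ⊢
    refine ⟨hx.1, fun hk => hx.2 ?_⟩
    rw [← PySem.Dict.contains_iff_mem_keys] at hk ⊢
    rw [PySem.Dict.contains_insert]
    simp [hk]
  · intro hall
    have h1 : u ∈ (pvU graph source).toFinset \ visited.keys.toFinset := by
      simp only [Finset.mem_sdiff, List.mem_toFinset]
      exact ⟨hu, fun hk => by rw [← PySem.Dict.contains_iff_mem_keys] at hk; simp [hk] at hnc⟩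
    have h2 := hall h1
    simp only [Finset.mem_sdiff, List.mem_toFinset] at h2
    exact h2.2 (by rw [← PySem.Dict.contains_iff_mem_keys, PySem.Dict.contains_insert]; simp)

-- body of B's inner for-loop: relax one adjacency entry p of the just-visited node (weight w, edges e)
def pvRelax (visited' : PySem.Dict String (Int × Int)) (w e : Int)
    (dd : PySem.Dict String (Int × Int)) (p : String × Int) : PySem.Dict String (Int × Int) :=
  if visited'.contains p.1 then dd
  else if dd.contains p.1 = false then dd.insert p.1 (w + p.2, e + 1)
  else if toLex ((w + p.2, e + 1) : Int × Int) < toLex (dd.getD p.1 (0, 0)) then dd.insert p.1 (w + p.2, e + 1)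
  else dd

lemma pvRelax_inv (graph : List (String × List (String × Int))) (source : String)
    (visited' : PySem.Dict String (Int × Int)) (w e : Int) (u : String)
    (d0 : PySem.Dict String (Int × Int))
    (h0 : ∀ p ∈ d0.items, p.1 ∈ pvU graph source ∧ visited'.contains p.1 = false) :
    ∀ p ∈ ((pvAdj graph u).foldl (pvRelax visited' w e) d0).items,
      p.1 ∈ pvU graph source ∧ visited'.contains p.1 = false := by
  refine List.foldlRecOn (motive := fun dd => ∀ p ∈ dd.items, p.1 ∈ pvU graph source ∧ visited'.contains p.1 = false) (pvAdj graph u) (pvRelax visited' w e) h0 ?_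
  intro dd hdd a ha
  unfold pvRelax
  split_ifs with h1 h2 h3
  · exact hdd
  · intro p hp
    rcases (PySem.Dict.mem_items_insert dd a.1 _ p).1 hp with rfl | ⟨hpm, _⟩
    · exact ⟨pvAdj_fst_mem_pvU graph source u ha, by simpa using h1⟩
    · exact hdd p hpm
  · intro p hp
    rcases (PySem.Dict.mem_items_insert dd a.1 _ p).1 hp with rfl | ⟨hpm, _⟩
    · exact ⟨pvAdj_fst_mem_pvU graph source u ha, by simpa using h1⟩
    · exact hdd p hpm
  · exact hdd

lemma pvErase_inv (graph : List (String × List (String × Int))) (source : String)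
    (dist visited : PySem.Dict String (Int × Int)) (u : String) (v : Int × Int)
    (hd : ∀ p ∈ dist.items, p.1 ∈ pvU graph source ∧ visited.contains p.1 = false) :
    ∀ p ∈ (dist.erase u).items, p.1 ∈ pvU graph source ∧ (visited.insert u v).contains p.1 = false := by
  intro p hp
  have hmem : p ∈ dist.items ∧ (p.1 == u) = false := by
    unfold PySem.Dict.erase at hp
    simp only [List.mem_filter, Bool.not_eq_true'] at hp
    exact hp
  refine ⟨(hd p hmem.1).1, ?_⟩
  rw [PySem.Dict.contains_insert]
  simp only [Bool.or_eq_false_iff]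
  exact ⟨hmem.2, (hd p hmem.1).2⟩

-- Port of B: Dijkstra without a heap — pick the discovered-but-unvisited node with the least
-- (weight, edges, node), move it to visited, relax its out-edges into the frontier dict.
def pvLoopB (graph : List (String × List (String × Int))) (source : String)
    (dist visited : PySem.Dict String (Int × Int))
    (hd : ∀ p ∈ dist.items, p.1 ∈ pvU graph source ∧ visited.contains p.1 = false) :
    PySem.Dict String (Int × Int) :=
  match hq : dist.items with
  | [] => visited
  | i0 :: irest =>
    let best := pvMinBy (fun kv => pvKey (kv.2.1, kv.2.2, kv.1)) i0 irest
    let dist1 := dist.erase best.1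
    let visited1 := visited.insert best.1 best.2
    let dist2 := (pvAdj graph best.1).foldl (pvRelax visited1 best.2.1 best.2.2) dist1
    pvLoopB graph source dist2 visited1
      (pvRelax_inv graph source visited1 best.2.1 best.2.2 best.1 dist1
        (pvErase_inv graph source dist visited best.1 best.2 hd))
termination_by pvMeasB graph source visited
decreasing_by
  have hbm : best ∈ dist.items := by
    rw [hq]; exact pvMinBy_mem _ i0 irest
  exact pvMeasB_lt graph source visited best.1 best.2 (hd best hbm).1 (hd best hbm).2

def shortest_shortest_path (graph : List (String × List (String × Int))) (source : String) :
    List (String × Int × Int) :=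
  (pvLoopA graph source [(0, 0, source)] PySem.Dict.empty).items

def shortest_shortest_path_alt (graph : List (String × List (String × Int))) (source : String) :
    List (String × Int × Int) :=
  (pvLoopB graph source (PySem.Dict.mk [(source, (0, 0))]) PySem.Dict.empty
    (by intro p hp
        simp only [List.mem_singleton] at hp
        subst hp
        exact ⟨by unfold pvU; simp, by simp [PySem.Dict.contains_empty]⟩)).items

-- ===== PRECONDITION & SPEC =====
def Spec_shortest_shortest_path (graph : List (String × List (String × Int))) (source : String) (out : List (String × Int × Int)) : Prop := out = shortest_shortest_path_alt graph source
instance (graph : List (String × List (String × Int))) (source : String) (out : List (String × Int × Int)) : Decidable (Spec_shortest_shortest_path graph source out) := by unfold Spec_shortest_shortest_path; infer_instance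

-- ===== CLAIM (what is proved, stated in full; the proofs are below) =====
def Claim_equal_shortest_shortest_path : Prop := ∀ (graph : List (String × List (String × Int))) (source : String), Dom_shortest_shortest_path graph source → Spec_shortest_shortest_path graph source (shortest_shortest_path graph source)

-- ===== LEMMAS AND PROOFS =====

lemma pvMinBy_le {α : Type} (f : α → Lex (Int × Lex (Int × String))) (a : α) (l : List α) :
    ∀ x ∈ a :: l, f (pvMinBy f a l) ≤ f x := by
  induction l generalizing a with
  | nil => simp [pvMinBy]
  | cons b t ih =>
    intro x hx
    have hmem := ih (if f b < f a then b else a)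
    simp only [pvMinBy, List.foldl_cons] at hmem ⊢
    rcases List.mem_cons.1 hx with rfl | hx'
    · refine le_trans (hmem _ (List.mem_cons.2 (Or.inl rfl))) ?_
      split_ifs with h
      · exact le_of_lt h
      · exact le_refl _
    · rcases List.mem_cons.1 hx' with rfl | hx''
      · refine le_trans (hmem _ (List.mem_cons.2 (Or.inl rfl))) ?_
        split_ifs with h
        · exact le_refl _
        · exact le_of_not_gt h
      · exact hmem x (List.mem_cons.2 (Or.inr hx''))

lemma pvLoopA_skip (graph : List (String × List (String × Int))) (source : String)
    (m0 : Int × Int × String) (rest : List (Int × Int × String))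
    (named : PySem.Dict String (Int × Int))
    (hcon : named.contains (pvMinBy pvKey m0 rest).2.2 = true) :
    pvLoopA graph source (m0 :: rest) named
      = pvLoopA graph source ((m0 :: rest).erase (pvMinBy pvKey m0 rest)) named := by
  conv_lhs => rw [pvLoopA]
  simp only [hcon, dite_true]

lemma pvLoopA_name (graph : List (String × List (String × Int))) (source : String)
    (m0 : Int × Int × String) (rest : List (Int × Int × String))
    (named : PySem.Dict String (Int × Int))
    (hcon : named.contains (pvMinBy pvKey m0 rest).2.2 = false) :
    pvLoopA graph source (m0 :: rest) named
      = pvLoopA graph source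
          ((pvAdj graph (pvMinBy pvKey m0 rest).2.2).foldl
            (fun acc p => if !((named.insert (pvMinBy pvKey m0 rest).2.2 ((pvMinBy pvKey m0 rest).1, (pvMinBy pvKey m0 rest).2.1)).contains p.1) then acc ++ [((pvMinBy pvKey m0 rest).1 + p.2, (pvMinBy pvKey m0 rest).2.1 + 1, p.1)] else acc)
            ((m0 :: rest).erase (pvMinBy pvKey m0 rest)))
          (named.insert (pvMinBy pvKey m0 rest).2.2 ((pvMinBy pvKey m0 rest).1, (pvMinBy pvKey m0 rest).2.1)) := by
  conv_lhs => rw [pvLoopA]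
  simp only [hcon, dite_false, Bool.false_eq_true]
lemma pvLoopB_unfold (graph : List (String × List (String × Int))) (source : String)
    (dist visited : PySem.Dict String (Int × Int))
    (hd : ∀ p ∈ dist.items, p.1 ∈ pvU graph source ∧ visited.contains p.1 = false)
    (i0 : String × Int × Int) (irest : List (String × Int × Int))
    (hq : dist.items = i0 :: irest)
    (best : String × Int × Int)
    (hb : best = pvMinBy (fun kv => pvKey (kv.2.1, kv.2.2, kv.1)) i0 irest)
    (hd2 : ∀ p ∈ ((pvAdj graph best.1).foldl
        (pvRelax (visited.insert best.1 best.2) best.2.1 best.2.2) (dist.erase best.1)).items,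
      p.1 ∈ pvU graph source ∧ (visited.insert best.1 best.2).contains p.1 = false) :
    pvLoopB graph source dist visited hd
      = pvLoopB graph source
          ((pvAdj graph best.1).foldl
            (pvRelax (visited.insert best.1 best.2) best.2.1 best.2.2) (dist.erase best.1))
          (visited.insert best.1 best.2) hd2 := by
  subst hb
  conv_lhs => rw [pvLoopB]
  split
  · next heq => rw [hq] at heq; cases heq
  · next j0 jrest heq =>
    rw [hq] at heq
    cases heq
    rfl
lemma pvKey_inj {t t' : Int × Int × String} (h : pvKey t = pvKey t') : t = t' := by
  unfold pvKey at h
  simp only [toLex_inj, Prod.mk.injEq] at h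
  obtain ⟨h1, h2, h3⟩ := h
  exact Prod.ext h1 (Prod.ext h2 h3)

lemma pvKey_mono {v v' : Int × Int} {n : String} (h : toLex v ≤ toLex v') :
    pvKey (v.1, v.2, n) ≤ pvKey (v'.1, v'.2, n) := by
  unfold pvKey
  rw [Prod.Lex.le_iff] at h ⊢
  simp only [ofLex_toLex] at h ⊢
  rcases h with h | ⟨h1, h2⟩
  · exact Or.inl h
  · refine Or.inr ⟨h1, ?_⟩
    rw [Prod.Lex.le_iff]
    simp only [ofLex_toLex]
    rcases lt_or_eq_of_le h2 with h3 | h3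
    · exact Or.inl h3
    · exact Or.inr ⟨h3, le_refl _⟩

lemma pvKey_mono_lt {v v' : Int × Int} {n : String} (h : toLex v < toLex v') :
    pvKey (v.1, v.2, n) < pvKey (v'.1, v'.2, n) := by
  unfold pvKey
  rw [Prod.Lex.lt_iff] at h ⊢
  simp only [ofLex_toLex] at h ⊢
  rcases h with h | ⟨h1, h2⟩
  · exact Or.inl h
  · refine Or.inr ⟨h1, ?_⟩
    rw [Prod.Lex.lt_iff]
    simp only [ofLex_toLex]
    exact Or.inl h2

lemma pvMemEraseItems {d : PySem.Dict String (Int × Int)} {k : String} {p : String × Int × Int} :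
    p ∈ (d.erase k).items ↔ p ∈ d.items ∧ p.1 ≠ k := by
  unfold PySem.Dict.erase
  simp [List.mem_filter]

lemma pvNodupErase {d : PySem.Dict String (Int × Int)} (k : String) (hnd : d.keys.Nodup) :
    (d.erase k).keys.Nodup := by
  unfold PySem.Dict.erase PySem.Dict.keys at *
  exact List.Nodup.sublist (List.Sublist.map _ List.filter_sublist) hnd

lemma pvContainsIff {d : PySem.Dict String (Int × Int)} {k : String} :
    d.contains k = true ↔ ∃ v, (k, v) ∈ d.items := by
  unfold PySem.Dict.contains
  rw [List.any_eq_true]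
  constructor
  · rintro ⟨p, hp, he⟩
    rw [beq_iff_eq] at he
    subst he
    exact ⟨p.2, by simpa using hp⟩
  · rintro ⟨v, hv⟩
    exact ⟨(k, v), hv, by simp⟩

lemma pvGetDMem {d : PySem.Dict String (Int × Int)} {k : String} (hnd : d.keys.Nodup)
    (hc : d.contains k = true) : (k, d.getD k (0, 0)) ∈ d.items := by
  obtain ⟨v, hv⟩ := pvContainsIff.1 hc
  have hg : d.get? k = some v := (PySem.Dict.get?_eq_some_iff_mem_items d k v hnd).2 hv
  rw [PySem.Dict.getD_of_get?_eq_some d (0, 0) hg]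
  exact hv

lemma pvItemsUnique {d : PySem.Dict String (Int × Int)} (hnd : d.keys.Nodup)
    {p p' : String × Int × Int} (h1 : p ∈ d.items) (h2 : p' ∈ d.items) (hk : p.1 = p'.1) :
    p = p' := by
  have g1 := PySem.Dict.get?_of_mem_items d (k := p.1) (v := p.2) (by simpa using h1) hnd
  have g2 := PySem.Dict.get?_of_mem_items d (k := p'.1) (v := p'.2) (by simpa using h2) hnd
  rw [hk, g2] at g1
  exact Prod.ext hk (Option.some.inj g1).symm
lemma pvStep (graph : List (String × List (String × Int))) (source : String)
    (w e : Int) (named' : PySem.Dict String (Int × Int)) :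
    ∀ (l : List (String × Int)) (q1 : List (Int × Int × String))
      (d1 : PySem.Dict String (Int × Int)),
      d1.keys.Nodup →
      (∀ t ∈ q1, named'.contains t.2.2 = false →
          ∃ v, (t.2.2, v) ∈ d1.items ∧ pvKey (v.1, v.2, t.2.2) ≤ pvKey t) →
      (∀ p ∈ d1.items, (p.2.1, p.2.2, p.1) ∈ q1) →
      ((l.foldl (pvRelax named' w e) d1).keys.Nodup ∧
       (∀ t ∈ q1 ++ (l.filter (fun p => !(named'.contains p.1))).map (fun p => (w + p.2, e + 1, p.1)),
          named'.contains t.2.2 = false →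
          ∃ v, (t.2.2, v) ∈ (l.foldl (pvRelax named' w e) d1).items ∧ pvKey (v.1, v.2, t.2.2) ≤ pvKey t) ∧
       (∀ p ∈ (l.foldl (pvRelax named' w e) d1).items,
          (p.2.1, p.2.2, p.1) ∈ q1 ++ (l.filter (fun p => !(named'.contains p.1))).map (fun p => (w + p.2, e + 1, p.1)))) := by
  intro l
  induction l with
  | nil =>
    intro q1 d1 hnd r1 r2
    simp only [List.foldl_nil, List.filter_nil, List.map_nil, List.append_nil]
    exact ⟨hnd, r1, r2⟩
  | cons a t ih =>
    intro q1 d1 hnd r1 r2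
    by_cases hv : named'.contains a.1 = true
    · have hrelax : pvRelax named' w e d1 a = d1 := by unfold pvRelax; simp [hv]
      have hfilter : (a :: t).filter (fun p => !(named'.contains p.1))
          = t.filter (fun p => !(named'.contains p.1)) := by
        simp [hv]
      rw [List.foldl_cons, hrelax, hfilter]
      exact ih q1 d1 hnd r1 r2
    · have hv' : named'.contains a.1 = false := by simpa using hv
      have hfilter : (a :: t).filter (fun p => !(named'.contains p.1))
          = a :: t.filter (fun p => !(named'.contains p.1)) := by
        simp [hv']
      have happ : q1 ++ ((a :: t).filter (fun p => !(named'.contains p.1))).map (fun p => (w + p.2, e + 1, p.1))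
          = (q1 ++ [(w + a.2, e + 1, a.1)]) ++ (t.filter (fun p => !(named'.contains p.1))).map (fun p => (w + p.2, e + 1, p.1)) := by
        rw [hfilter]; simp
      rw [List.foldl_cons, happ]
      have hmain :
          (pvRelax named' w e d1 a).keys.Nodup ∧
          (∀ t' ∈ q1 ++ [((w + a.2 : Int), (e + 1 : Int), a.1)], named'.contains t'.2.2 = false →
            ∃ v, (t'.2.2, v) ∈ (pvRelax named' w e d1 a).items ∧ pvKey (v.1, v.2, t'.2.2) ≤ pvKey t') ∧
          (∀ p ∈ (pvRelax named' w e d1 a).items,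
            (p.2.1, p.2.2, p.1) ∈ q1 ++ [((w + a.2 : Int), (e + 1 : Int), a.1)]) := by
        unfold pvRelax
        rw [if_neg (by simp [hv'])]
        by_cases hc : d1.contains a.1 = false
        · rw [if_pos hc]
          refine ⟨PySem.Dict.nodup_keys_insert _ _ _ hnd, ?_, ?_⟩
          · intro t' ht' hnm
            rcases List.mem_append.1 ht' with ht' | ht'
            · by_cases heq : t'.2.2 = a.1
              · obtain ⟨v, hvm, _⟩ := r1 t' ht' hnm
                exfalso
                have : d1.contains a.1 = true := pvContainsIff.2 ⟨v, heq ▸ hvm⟩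
                rw [this] at hc; cases hc
              · obtain ⟨v, hvm, hvle⟩ := r1 t' ht' hnm
                exact ⟨v, (PySem.Dict.mem_items_insert _ _ _ _).2 (Or.inr ⟨hvm, heq⟩), hvle⟩
            · rw [List.mem_singleton] at ht'
              subst ht'
              exact ⟨(w + a.2, e + 1), (PySem.Dict.mem_items_insert _ _ _ _).2 (Or.inl rfl), le_refl _⟩
          · intro p hp
            rcases (PySem.Dict.mem_items_insert _ _ _ _).1 hp with rfl | ⟨hpm, _⟩
            · exact List.mem_append.2 (Or.inr (List.mem_singleton.2 rfl))
            · exact List.mem_append.2 (Or.inl (r2 p hpm))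
        · have hc' : d1.contains a.1 = true := by simpa using hc
          rw [if_neg (by simp [hc'])]
          have hold := pvGetDMem hnd hc'
          by_cases hlt : toLex ((w + a.2, e + 1) : Int × Int) < toLex (d1.getD a.1 (0, 0))
          · rw [if_pos hlt]
            refine ⟨PySem.Dict.nodup_keys_insert _ _ _ hnd, ?_, ?_⟩
            · intro t' ht' hnm
              rcases List.mem_append.1 ht' with ht' | ht'
              · obtain ⟨v, hvm, hvle⟩ := r1 t' ht' hnm
                by_cases heq : t'.2.2 = a.1
                · have hveq := pvItemsUnique hnd hvm hold (by simpa using heq)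
                  have hvold : v = d1.getD a.1 (0, 0) := congrArg Prod.snd hveq
                  refine ⟨(w + a.2, e + 1), (PySem.Dict.mem_items_insert _ _ _ _).2 (Or.inl (by rw [heq])), ?_⟩
                  have h1 := pvKey_mono_lt (v := (w + a.2, e + 1)) (v' := v) (n := t'.2.2)
                    (by rw [hvold]; exact hlt)
                  exact le_of_lt (lt_of_lt_of_le h1 hvle)
                · exact ⟨v, (PySem.Dict.mem_items_insert _ _ _ _).2 (Or.inr ⟨hvm, heq⟩), hvle⟩
              · rw [List.mem_singleton] at ht'
                subst ht'
                exact ⟨(w + a.2, e + 1), (PySem.Dict.mem_items_insert _ _ _ _).2 (Or.inl rfl), le_refl _⟩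
            · intro p hp
              rcases (PySem.Dict.mem_items_insert _ _ _ _).1 hp with rfl | ⟨hpm, _⟩
              · exact List.mem_append.2 (Or.inr (List.mem_singleton.2 rfl))
              · exact List.mem_append.2 (Or.inl (r2 p hpm))
          · rw [if_neg hlt]
            refine ⟨hnd, ?_, ?_⟩
            · intro t' ht' hnm
              rcases List.mem_append.1 ht' with ht' | ht'
              · exact r1 t' ht' hnm
              · rw [List.mem_singleton] at ht'
                subst ht'
                exact ⟨d1.getD a.1 (0, 0), hold, pvKey_mono (le_of_not_gt hlt)⟩
            · intro p hp
              exact List.mem_append.2 (Or.inl (r2 p hp))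
      exact ih (q1 ++ [((w + a.2 : Int), (e + 1 : Int), a.1)]) (pvRelax named' w e d1 a)
        hmain.1 hmain.2.1 hmain.2.2
lemma pvSim (c n : Nat) (graph : List (String × List (String × Int))) (source : String)
    (q : List (Int × Int × String)) (dist named : PySem.Dict String (Int × Int))
    (hc : pvMeasA graph source q named ≤ c) (hn : q.length ≤ n)
    (hd : ∀ p ∈ dist.items, p.1 ∈ pvU graph source ∧ named.contains p.1 = false)
    (hnd : dist.keys.Nodup)
    (r1 : ∀ t ∈ q, named.contains t.2.2 = false →
        ∃ v, (t.2.2, v) ∈ dist.items ∧ pvKey (v.1, v.2, t.2.2) ≤ pvKey t)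
    (r2 : ∀ p ∈ dist.items, (p.2.1, p.2.2, p.1) ∈ q) :
    pvLoopA graph source q named = pvLoopB graph source dist named hd := by
  cases q with
  | nil =>
    have hitems : dist.items = [] := by
      rw [List.eq_nil_iff_forall_not_mem]
      intro p hp
      simpa using r2 p hp
    have hdist : dist = PySem.Dict.mk [] := PySem.Dict.ext hitems
    subst hdist
    rw [pvLoopA]
    conv_rhs => rw [pvLoopB]
  | cons m0 rest =>
    have hmmem : pvMinBy pvKey m0 rest ∈ m0 :: rest := pvMinBy_mem pvKey m0 rest
    have hmmin : ∀ x ∈ m0 :: rest, pvKey (pvMinBy pvKey m0 rest) ≤ pvKey x := pvMinBy_le pvKey m0 rest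
    by_cases hcon : named.contains (pvMinBy pvKey m0 rest).2.2 = true
    · -- stale entry: A pops and skips, B unchanged
      rw [pvLoopA_skip graph source m0 rest named hcon]
      have hlen : ((m0 :: rest).erase (pvMinBy pvKey m0 rest)).length ≤ n - 1 := by
        have := List.length_erase_of_mem hmmem
        simp only [List.length_cons] at this hn
        omega
      have hn1 : 1 ≤ n := by simp only [List.length_cons] at hn; omega
      refine pvSim c (n - 1) graph source ((m0 :: rest).erase (pvMinBy pvKey m0 rest)) dist named
        (le_trans (pvMeasA_mono graph source named (pvVA_erase_subset graph source _ _)) hc) hlen hd hnd ?_ ?_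
      · intro t ht hnm
        exact r1 t (List.mem_of_mem_erase ht) hnm
      · intro p hp
        have hne : ((p.2.1, p.2.2, p.1) : Int × Int × String) ≠ pvMinBy pvKey m0 rest := by
          intro h
          have : named.contains p.1 = true := by rw [show p.1 = (pvMinBy pvKey m0 rest).2.2 from by rw [← h]]; exact hcon
          rw [(hd p hp).2] at this; cases this
        exact (List.mem_erase_of_ne hne).2 (r2 p hp)
    · have hcon' : named.contains (pvMinBy pvKey m0 rest).2.2 = false := by simpa using hcon
      obtain ⟨v, hvm, hvle⟩ := r1 (pvMinBy pvKey m0 rest) hmmem hcon'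
      have hentry : ((v.1, v.2, (pvMinBy pvKey m0 rest).2.2) : Int × Int × String) ∈ m0 :: rest :=
        r2 ((pvMinBy pvKey m0 rest).2.2, v) hvm
      have hkeq : pvKey (v.1, v.2, (pvMinBy pvKey m0 rest).2.2) = pvKey (pvMinBy pvKey m0 rest) :=
        le_antisymm hvle (hmmin _ hentry)
      have hmeq : ((v.1, v.2, (pvMinBy pvKey m0 rest).2.2) : Int × Int × String) = pvMinBy pvKey m0 rest :=
        pvKey_inj hkeq
      have hmv : ((pvMinBy pvKey m0 rest).1, (pvMinBy pvKey m0 rest).2.1) = v := by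
        rw [← hmeq]
      obtain ⟨i0, irest, hitems⟩ := List.exists_cons_of_ne_nil
        (show dist.items ≠ [] from fun h => by rw [h] at hvm; cases hvm)
      -- B picks exactly the node A pops
      have hbdef : ((pvMinBy pvKey m0 rest).2.2, v) = pvMinBy (fun kv => pvKey (kv.2.1, kv.2.2, kv.1)) i0 irest := by
        have hbmem : pvMinBy (fun kv => pvKey (kv.2.1, kv.2.2, kv.1)) i0 irest ∈ dist.items := by
          rw [hitems]; exact pvMinBy_mem _ i0 irest
        have hbmin := pvMinBy_le (fun kv => pvKey (kv.2.1, kv.2.2, kv.1)) i0 irest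
        have h1 : pvKey ((pvMinBy (fun kv => pvKey (kv.2.1, kv.2.2, kv.1)) i0 irest).2.1,
            (pvMinBy (fun kv => pvKey (kv.2.1, kv.2.2, kv.1)) i0 irest).2.2,
            (pvMinBy (fun kv => pvKey (kv.2.1, kv.2.2, kv.1)) i0 irest).1)
            ≤ pvKey (v.1, v.2, (pvMinBy pvKey m0 rest).2.2) :=
          hbmin ((pvMinBy pvKey m0 rest).2.2, v) (by rw [← hitems]; exact hvm)
        have h2 := hmmin _ (r2 _ hbmem)
        rw [hkeq] at h1
        have h3 := pvKey_inj (le_antisymm h1 h2)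
        have h4 : ((pvMinBy (fun kv => pvKey (kv.2.1, kv.2.2, kv.1)) i0 irest).2.1,
            (pvMinBy (fun kv => pvKey (kv.2.1, kv.2.2, kv.1)) i0 irest).2.2,
            (pvMinBy (fun kv => pvKey (kv.2.1, kv.2.2, kv.1)) i0 irest).1)
            = ((pvMinBy pvKey m0 rest).1, (pvMinBy pvKey m0 rest).2.1, (pvMinBy pvKey m0 rest).2.2) := by
          rw [h3, ← hmeq]
        obtain ⟨ha, hb, hc⟩ : (pvMinBy (fun kv => pvKey (kv.2.1, kv.2.2, kv.1)) i0 irest).2.1 = (pvMinBy pvKey m0 rest).1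
            ∧ (pvMinBy (fun kv => pvKey (kv.2.1, kv.2.2, kv.1)) i0 irest).2.2 = (pvMinBy pvKey m0 rest).2.1
            ∧ (pvMinBy (fun kv => pvKey (kv.2.1, kv.2.2, kv.1)) i0 irest).1 = (pvMinBy pvKey m0 rest).2.2 := by
          simpa [Prod.ext_iff] using h4
        refine (Prod.ext hc ?_).symm
        rw [← hmv, Prod.ext_iff]
        exact ⟨ha, hb⟩
      rw [pvLoopA_name graph source m0 rest named hcon']
      rw [pvLoopB_unfold graph source dist named hd i0 irest hitems
        ((pvMinBy pvKey m0 rest).2.2, v) hbdef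
        (pvRelax_inv graph source (named.insert (pvMinBy pvKey m0 rest).2.2 v) v.1 v.2 (pvMinBy pvKey m0 rest).2.2
          (dist.erase (pvMinBy pvKey m0 rest).2.2)
          (pvErase_inv graph source dist named (pvMinBy pvKey m0 rest).2.2 v hd))]
      rw [PySem.List.foldl_append_if]
      rw [← hmv]
      -- invariants after the relaxation round
      have hstep := pvStep graph source (pvMinBy pvKey m0 rest).1 (pvMinBy pvKey m0 rest).2.1
        (named.insert (pvMinBy pvKey m0 rest).2.2 ((pvMinBy pvKey m0 rest).1, (pvMinBy pvKey m0 rest).2.1))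
        (pvAdj graph (pvMinBy pvKey m0 rest).2.2)
        ((m0 :: rest).erase (pvMinBy pvKey m0 rest))
        (dist.erase (pvMinBy pvKey m0 rest).2.2)
        (pvNodupErase _ hnd)
        (by
          intro t ht hnm
          have hne : t.2.2 ≠ (pvMinBy pvKey m0 rest).2.2 := by
            intro h
            rw [PySem.Dict.contains_insert] at hnm
            simp [h] at hnm
          have hnm0 : named.contains t.2.2 = false := by
            rw [PySem.Dict.contains_insert] at hnm
            simpa using (Bool.or_eq_false_iff.1 hnm).2
          obtain ⟨v', hv'm, hv'le⟩ := r1 t (List.mem_of_mem_erase ht) hnm0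
          exact ⟨v', pvMemEraseItems.2 ⟨hv'm, hne⟩, hv'le⟩)
        (by
          intro p hp
          obtain ⟨hpm, hpne⟩ := pvMemEraseItems.1 hp
          have hne : ((p.2.1, p.2.2, p.1) : Int × Int × String) ≠ pvMinBy pvKey m0 rest := by
            intro h
            exact hpne (by rw [← h])
          exact (List.mem_erase_of_ne hne).2 (r2 p hpm))
      have hmeas : pvMeasA graph source
          ((m0 :: rest).erase (pvMinBy pvKey m0 rest) ++
            (List.filter (fun p => !(named.insert (pvMinBy pvKey m0 rest).2.2 ((pvMinBy pvKey m0 rest).1, (pvMinBy pvKey m0 rest).2.1)).contains p.1) (pvAdj graph (pvMinBy pvKey m0 rest).2.2)).map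
              (fun p => ((pvMinBy pvKey m0 rest).1 + p.2, (pvMinBy pvKey m0 rest).2.1 + 1, p.1)))
          (named.insert (pvMinBy pvKey m0 rest).2.2 ((pvMinBy pvKey m0 rest).1, (pvMinBy pvKey m0 rest).2.1))
          < pvMeasA graph source (m0 :: rest) named := by
        apply pvMeasA_name_lt graph source named _ hmmem hcon'
        rw [pvVA_append]
        apply Finset.union_subset
        · exact pvVA_erase_subset graph source _ _
        · intro x hx
          simp only [List.mem_toFinset, List.mem_map] at hx
          rcases hx with ⟨t, ht, rfl⟩
          rcases ht with ⟨p, hp, rfl⟩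
          unfold pvVA
          simp only [Finset.mem_union, List.mem_toFinset]
          exact Or.inl (pvAdj_fst_mem_pvU graph source _ (List.mem_of_mem_filter hp))
      have hc1 : 1 ≤ c := by omega
      exact pvSim (c - 1) _ graph source _ _ _
        (by omega) (le_refl _)
        (pvRelax_inv graph source _ _ _ _ _ (pvErase_inv graph source dist named _ _ hd))
        hstep.1 hstep.2.1 hstep.2.2
termination_by (c, n)
decreasing_by
  · exact Prod.Lex.right' _ (le_refl c) (by omega)
  · exact Prod.Lex.left _ _ (by omega)

-- ===== VERDICT (by name: the statement is the Claim_ definition above) =====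
theorem shortest_shortest_path_spec : Claim_equal_shortest_shortest_path := by
  intro graph source _
  unfold Spec_shortest_shortest_path shortest_shortest_path shortest_shortest_path_alt
  congr 1
  apply pvSim (pvMeasA graph source [(0, 0, source)] PySem.Dict.empty) 1
  · exact le_refl _
  · simp
  · simp [PySem.Dict.keys]
  · intro t ht hnm
    simp only [List.mem_singleton] at ht
    subst ht
    exact ⟨(0, 0), by simp, le_refl _⟩
  · intro p hp
    have hp' : p = (source, ((0 : Int), (0 : Int))) := by simpa using hp
    subst hp'
    simp
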